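-- pv_equiv track=rewrite | github.com/RuslanMagdy/Word-proccesing | C3C3words.py | app_rel
-- ===== SOURCE A (Python) =====
-- def cleaner_ext(w):
--     if w == '':
--         return ''
--     if len(w) == 1:
--         return w
--     for i in range(len(w) - 1):
--         if w[i:i + 2] == 'tT' or w[i:i + 2] == 'Tt' or w[i:i + 2] == 'zZ' or w[i:i + 2] == 'Zz':
--             return cleaner_ext(w[:i] + w[i + 2:])
--     return w
--
-- def app_rel(w, v):
--     if w == v: return w
--     if w == '':
--         return ''
--     if len(w) == 1:
--         return w
--     for i in range(len(w) - 1):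
--         if w[i:i + 2] == 'tt':
--             return app_rel(w[:i] + 'T' + w[i + 2:], '-1')
--         if w[i:i + 2] == 'zz':
--             return app_rel(w[:i] + 'Z' + w[i + 2:], '-1')
--         if w[i:i + 2] == 'ZZ':
--             return app_rel(w[:i] + 'z' + w[i + 2:], '-1')
--         if w[i:i + 2] == 'TT':
--             return app_rel(w[:i] + 't' + w[i + 2:], '-1')
--     return app_rel(cleaner_ext(w), w)
-- ===== SOURCE B (Python) =====
-- # B: single left-to-right stack pass (free-product Z/3 * Z/3 normalization),
-- # instead of A's repeated quadratic rescans.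
--
-- _VAL = {'t': ('t', 1), 'T': ('t', 2), 'z': ('z', 1), 'Z': ('z', 2)}
-- _LTR = {('t', 1): 't', ('t', 2): 'T', ('z', 1): 'z', ('z', 2): 'Z'}
--
-- def _combine(a, b):
--     # None: no rule; '': the pair cancels; otherwise the single replacement letter
--     if a in _VAL and b in _VAL:
--         ga, na = _VAL[a]
--         gb, nb = _VAL[b]
--         if ga == gb:
--             s = (na + nb) % 3
--             return '' if s == 0 else _LTR[(ga, s)]
--     return None
--
-- def app_rel(w, v):
--     if w == v:
--         return w
--     stack = []
--     for c in w:
--         while True: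
--             if not stack:
--                 stack.append(c)
--                 break
--             r = _combine(stack[-1], c)
--             if r is None:
--                 stack.append(c)
--                 break
--             stack.pop()
--             if r == '':
--                 break
--             c = r
--     return ''.join(stack)
-- ===== Notes on version B (the rewrite author's own statement) =====
-- stated objective: faster
-- what changed: A repeatedly rescans the whole word from position 0 after every single rewrite (and alternates combine passes with a separate recursive cancellation cleaner); B does one left-to-right pass with a stack, combining or cancelling each incoming letter with the stack top (free-product Z/3 * Z/3 normalization), keeping A's w==v short-circuit.
import Mathlib
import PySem

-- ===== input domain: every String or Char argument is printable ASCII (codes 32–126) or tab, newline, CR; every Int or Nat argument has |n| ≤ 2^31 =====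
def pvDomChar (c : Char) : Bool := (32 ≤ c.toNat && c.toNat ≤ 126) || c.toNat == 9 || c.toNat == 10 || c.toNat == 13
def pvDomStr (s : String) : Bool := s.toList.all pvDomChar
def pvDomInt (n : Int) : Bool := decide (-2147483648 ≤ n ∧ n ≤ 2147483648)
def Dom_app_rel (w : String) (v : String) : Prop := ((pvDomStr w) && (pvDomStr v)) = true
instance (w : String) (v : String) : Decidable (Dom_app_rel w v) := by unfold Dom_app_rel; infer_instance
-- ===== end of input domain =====

-- B replaces A's repeated full rescans (restart from scratch after every single rewrite) by
-- one left-to-right stack pass that combines/cancels same-group adjacent letters.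

-- ===== PORT A =====
-- A's inner `for i in range(len(w)-1)` loops scan left to right for the FIRST adjacent pair
-- matching a rule and return the rewritten word `w[:i] + r + w[i+2:]`; each loop is
-- transcribed as a structural scan over the character list (same index order, same order of
-- the checks at each index, same rewritten word).

-- the four checks of app_rel's loop body, in Python's order: 'tt'→'T', 'zz'→'Z', 'ZZ'→'z', 'TT'→'t'
def combChar (a b : Char) : Option Char :=
  if a = 't' ∧ b = 't' then some 'T'
  else if a = 'z' ∧ b = 'z' then some 'Z'
  else if a = 'Z' ∧ b = 'Z' then some 'z'
  else if a = 'T' ∧ b = 'T' then some 't'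
  else none

-- app_rel's loop: first i with a combining pair, returning w[:i] + r + w[i+2:]
def scanA : List Char → Option (List Char)
  | [] => none
  | [_] => none
  | a :: b :: r =>
    match combChar a b with
    | some c => some (c :: r)
    | none => (scanA (b :: r)).map (a :: ·)

-- the four checks of cleaner_ext's loop body, in Python's order: 'tT', 'Tt', 'zZ', 'Zz'
def cancPair (a b : Char) : Bool :=
  (a = 't' ∧ b = 'T') ∨ (a = 'T' ∧ b = 't') ∨ (a = 'z' ∧ b = 'Z') ∨ (a = 'Z' ∧ b = 'z')

-- cleaner_ext's loop: first i with a cancelling pair, returning w[:i] + w[i+2:]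
def scanC : List Char → Option (List Char)
  | [] => none
  | [_] => none
  | a :: b :: r =>
    if cancPair a b then some r
    else (scanC (b :: r)).map (a :: ·)

-- termination facts for the two recursive defs below
theorem scanA_len : ∀ {w w' : List Char}, scanA w = some w' → w'.length + 1 = w.length := by
  intro w
  induction w with
  | nil => simp [scanA]
  | cons a t ih =>
    cases t with
    | nil => simp [scanA]
    | cons b r =>
      intro w' h
      unfold scanA at h
      cases hc : combChar a b with
      | some c => rw [hc] at h; injection h with h; subst h; simp
      | none =>
        rw [hc] at h; simp only [Option.map_eq_some_iff] at h
        obtain ⟨u, hu, rfl⟩ := h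
        have := ih hu
        simp_all

theorem scanC_len : ∀ {w w' : List Char}, scanC w = some w' → w'.length + 2 = w.length := by
  intro w
  induction w with
  | nil => simp [scanC]
  | cons a t ih =>
    cases t with
    | nil => simp [scanC]
    | cons b r =>
      intro w' h
      unfold scanC at h
      split_ifs at h
      · injection h with h; subst h; simp
      · simp only [Option.map_eq_some_iff] at h
        obtain ⟨u, hu, rfl⟩ := h
        have := ih hu
        simp_all

def cleaner_ext (w : List Char) : List Char :=
  if w = [] then []
  else if w.length = 1 then w
  else
    match _h : scanC w with
    | some w' => cleaner_ext w'
    | none => w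
termination_by w.length
decreasing_by
  have := scanC_len _h; omega

theorem cleaner_len (w : List Char) : (cleaner_ext w).length ≤ w.length := by
  have H : ∀ (n : Nat) (w : List Char), w.length ≤ n → (cleaner_ext w).length ≤ w.length := by
    intro n
    induction n with
    | zero =>
      intro w hw
      rcases w with _ | ⟨c, w⟩
      · simp [cleaner_ext]
      · simp at hw
    | succ n ih =>
      intro w hw
      rw [cleaner_ext.eq_def]
      split_ifs with h0 h1
      · simp [h0]
      · exact le_rfl
      · split
        · next w' hs =>
          have h2 := scanC_len hs
          have := ih w' (by omega)
          omega
        · exact le_rfl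
  exact H w.length w le_rfl

theorem cleaner_fix_or_short (w : List Char) :
    cleaner_ext w = w ∨ (cleaner_ext w).length + 2 ≤ w.length := by
  rw [cleaner_ext.eq_def]
  split_ifs with h0 h1
  · left; rw [h0]
  · left; rfl
  · split
    · next w' hs =>
      right
      have := scanC_len hs
      have := cleaner_len w'
      omega
    · left; rfl

def app_relList (w v : List Char) : List Char :=
  if w = v then w
  else if w = [] then []
  else if w.length = 1 then w
  else
    match _h : scanA w with
    | some w' => app_relList w' ['-', '1']
    | none => app_relList (cleaner_ext w) w
termination_by w.length * 2 + (if w = v then 0 else 1)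
decreasing_by
  · have := scanA_len _h; split_ifs <;> omega
  · rename_i hv _ _
    rcases cleaner_fix_or_short w with hc | hc
    · rw [hc]; simp [hv]
    · have : cleaner_ext w ≠ w := by
        intro he; rw [he] at hc; omega
      simp only [if_neg this, if_neg hv]
      omega

def app_rel (w : String) (v : String) : String :=
  String.ofList (app_relList w.toList v.toList)

-- ===== PORT B =====
-- Source B's table _VAL: group ('t' ↦ true, 'z' ↦ false) and exponent of each generator letter
def gval (c : Char) : Option (Bool × Nat) :=
  if c = 't' then some (true, 1)
  else if c = 'T' then some (true, 2)
  else if c = 'z' then some (false, 1)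
  else if c = 'Z' then some (false, 2)
  else none

-- Source B's table _LTR: the letter with group g and exponent n (n ∈ {1, 2})
def ltr (g : Bool) (n : Nat) : Char :=
  if g then (if n = 1 then 't' else 'T') else (if n = 1 then 'z' else 'Z')

-- Source B's inner `while True` loop: push c onto the stack, combining/cancelling with the top.
-- The stack's top is the list head here (Python appends/pops at the list's end; the final
-- ''.join therefore becomes reverse-then-pack in app_rel_alt).
def push (st : List Char) (c : Char) : List Char :=
  match st with
  | [] => [c]
  | top :: rest =>
    match gval top, gval c with
    | some (g1, n1), some (g2, n2) =>
      if g1 = g2 then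
        if (n1 + n2) % 3 = 0 then rest
        else push rest (ltr g1 ((n1 + n2) % 3))
      else c :: top :: rest
    | _, _ => c :: top :: rest

def app_rel_alt (w : String) (v : String) : String :=
  if w = v then w
  else String.ofList ((w.toList.foldl push []).reverse)

-- ===== PRECONDITION & SPEC =====
def Spec_app_rel (w : String) (v : String) (out : String) : Prop := out = app_rel_alt w v
instance (w : String) (v : String) (out : String) : Decidable (Spec_app_rel w v out) := by unfold Spec_app_rel; infer_instance

-- ===== CLAIM (what is proved, stated in full; the proofs are below) =====
def Claim_equal_app_rel : Prop := ∀ (w : String) (v : String), Dom_app_rel w v → Spec_app_rel w v (app_rel w v)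

-- ===== LEMMAS AND PROOFS =====

-- two characters interact iff both are generator letters of the same group
def sameg (a b : Char) : Bool :=
  match gval a, gval b with
  | some (g1, _), some (g2, _) => g1 = g2
  | _, _ => false

theorem sameg_comm (a b : Char) : sameg a b = sameg b a := by
  unfold sameg
  rcases gval a with _ | ⟨g1, n1⟩ <;> rcases gval b with _ | ⟨g2, n2⟩ <;> try rfl
  cases g1 <;> cases g2 <;> rfl

theorem gval_cases {c : Char} {p : Bool × Nat} (h : gval c = some p) :
    (c = 't' ∧ p = (true, 1)) ∨ (c = 'T' ∧ p = (true, 2)) ∨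
    (c = 'z' ∧ p = (false, 1)) ∨ (c = 'Z' ∧ p = (false, 2)) := by
  unfold gval at h; split_ifs at h <;> simp_all

theorem gval_ltr {c : Char} {g : Bool} {n : Nat} (h : gval c = some (g, n)) :
    ltr g n = c := by
  rcases gval_cases h with ⟨rfl, h⟩ | ⟨rfl, h⟩ | ⟨rfl, h⟩ | ⟨rfl, h⟩ <;> simp_all [ltr]

theorem gval_n_mem {c : Char} {g : Bool} {n : Nat} (h : gval c = some (g, n)) :
    n = 1 ∨ n = 2 := by
  rcases gval_cases h with ⟨rfl, h⟩ | ⟨rfl, h⟩ | ⟨rfl, h⟩ | ⟨rfl, h⟩ <;> simp_all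

theorem gval_of_ltr {n : Nat} (g : Bool) (h : n = 1 ∨ n = 2) :
    gval (ltr g n) = some (g, n) := by
  rcases h with rfl | rfl <;> cases g <;> simp [ltr, gval]

-- a stack is OK when no two adjacent cells hold interacting letters
def StackOK (st : List Char) : Prop := List.IsChain (fun a b => sameg a b = false) st

theorem sameg_false_of_same_class {t a b : Char} {g : Bool} {na nb : Nat}
    (h : sameg t a = false) (ha : gval a = some (g, na)) (hb : gval b = some (g, nb)) :
    sameg t b = false := by
  unfold sameg at *
  rcases ht : gval t with _ | ⟨gt, nt⟩ <;> simp_all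

theorem push_no_interact {st : List Char} {c : Char}
    (h : ∀ t ∈ st.head?, sameg t c = false) : push st c = c :: st := by
  rcases st with _ | ⟨top, rest⟩
  · rfl
  · have hs : sameg top c = false := h top rfl
    unfold sameg at hs
    rcases h1 : gval top with _ | ⟨g1, n1⟩ <;> rcases h2 : gval c with _ | ⟨g2, n2⟩ <;>
      simp_all [push]

theorem push_ok : ∀ {st : List Char}, StackOK st → ∀ (c : Char), StackOK (push st c) := by
  intro st
  induction st with
  | nil => intro _ c; simp [push, StackOK]
  | cons top rest ih =>
    intro h c
    have hrest : StackOK rest := h.tail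
    rcases h1 : gval top with _ | ⟨g1, n1⟩ <;> rcases h2 : gval c with _ | ⟨g2, n2⟩
    · simp only [push, h1, h2]
      exact List.isChain_cons_cons.mpr ⟨by simp [sameg, h1, h2], h⟩
    · simp only [push, h1, h2]
      exact List.isChain_cons_cons.mpr ⟨by simp [sameg, h1, h2], h⟩
    · simp only [push, h1, h2]
      exact List.isChain_cons_cons.mpr ⟨by simp [sameg, h1, h2], h⟩
    · simp only [push, h1, h2]
      by_cases hg : g1 = g2
      · rw [if_pos hg]
        by_cases hz : (n1 + n2) % 3 = 0
        · rw [if_pos hz]; exact hrest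
        · rw [if_neg hz]; exact ih hrest _
      · rw [if_neg hg]
        refine List.isChain_cons_cons.mpr ⟨?_, h⟩
        simp only [sameg, h1, h2]
        simp only [decide_eq_false_iff_not]
        exact fun hh => hg hh.symm

-- one push-push step equals pushing the rewritten pair onto an OK stack
theorem push_push {st : List Char} {a b : Char} {g : Bool} {n1 n2 : Nat}
    (hok : StackOK st) (ha : gval a = some (g, n1)) (hb : gval b = some (g, n2)) :
    push (push st a) b =
      if (n1 + n2) % 3 = 0 then st else push st (ltr g ((n1 + n2) % 3)) := by
  have hn1 := gval_n_mem ha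
  have hn2 := gval_n_mem hb
  rcases st with _ | ⟨top, rest⟩
  · simp [push, ha, hb]
  · rcases h1 : gval top with _ | ⟨gt, m⟩
    · have e1 : push (top :: rest) a = a :: top :: rest := by simp [push, h1, ha]
      rw [e1]
      simp [push, ha, hb]
    · have hm := gval_n_mem h1
      by_cases hg : gt = g
      · subst hg
        have hhead : ∀ t ∈ rest.head?, sameg t top = false := by
          intro t ht
          rcases rest with _ | ⟨r0, rr⟩
          · simp at ht
          · simp only [List.head?_cons, Option.mem_some_iff] at ht
            subst ht
            have := (List.isChain_cons_cons.mp hok).1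
            rw [sameg_comm]; exact this
        by_cases hu : (m + n1) % 3 = 0
        · have e1 : push (top :: rest) a = rest := by simp [push, h1, ha, hu]
          rw [e1]
          by_cases hs : (n1 + n2) % 3 = 0
          · rw [if_pos hs]
            have hmn : m = n2 := by omega
            have hbt : b = top := by
              have e2 := gval_ltr hb
              have e3 := gval_ltr h1
              rw [hmn] at e3
              rw [← e2, ← e3]
            rw [hbt]
            exact push_no_interact hhead
          · rw [if_neg hs]
            have hgs := gval_of_ltr gt (show (n1 + n2) % 3 = 1 ∨ (n1 + n2) % 3 = 2 by omega)
            have e2 : push (top :: rest) (ltr gt ((n1 + n2) % 3)) =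
                if (m + (n1 + n2) % 3) % 3 = 0 then rest
                else push rest (ltr gt ((m + (n1 + n2) % 3) % 3)) := by
              simp [push, h1, hgs]
            rw [e2]
            have hms : (m + (n1 + n2) % 3) % 3 = n2 := by omega
            rw [hms, if_neg (by omega), gval_ltr hb]
        · have hgu := gval_of_ltr gt (show (m + n1) % 3 = 1 ∨ (m + n1) % 3 = 2 by omega)
          have e1 : push (top :: rest) a = push rest (ltr gt ((m + n1) % 3)) := by
            simp [push, h1, ha, hu]
          have e1' : push rest (ltr gt ((m + n1) % 3)) = (ltr gt ((m + n1) % 3)) :: rest :=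
            push_no_interact (fun t ht => sameg_false_of_same_class (hhead t ht) h1 hgu)
          rw [e1, e1']
          have e2 : push ((ltr gt ((m + n1) % 3)) :: rest) b =
              if ((m + n1) % 3 + n2) % 3 = 0 then rest
              else push rest (ltr gt (((m + n1) % 3 + n2) % 3)) := by
            simp [push, hgu, hb]
          rw [e2]
          by_cases hw : ((m + n1) % 3 + n2) % 3 = 0
          · rw [if_pos hw, if_neg (show ¬ (n1 + n2) % 3 = 0 by omega)]
            have hgs := gval_of_ltr gt (show (n1 + n2) % 3 = 1 ∨ (n1 + n2) % 3 = 2 by omega)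
            have e3 : push (top :: rest) (ltr gt ((n1 + n2) % 3)) =
                if (m + (n1 + n2) % 3) % 3 = 0 then rest
                else push rest (ltr gt ((m + (n1 + n2) % 3) % 3)) := by
              simp [push, h1, hgs]
            rw [e3, if_pos (by omega)]
          · rw [if_neg hw]
            by_cases hs : (n1 + n2) % 3 = 0
            · rw [if_pos hs]
              have hww : ((m + n1) % 3 + n2) % 3 = m := by omega
              rw [hww, gval_ltr h1]
              exact push_no_interact hhead
            · rw [if_neg hs]
              have hgs := gval_of_ltr gt (show (n1 + n2) % 3 = 1 ∨ (n1 + n2) % 3 = 2 by omega)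
              have e3 : push (top :: rest) (ltr gt ((n1 + n2) % 3)) =
                  if (m + (n1 + n2) % 3) % 3 = 0 then rest
                  else push rest (ltr gt ((m + (n1 + n2) % 3) % 3)) := by
                simp [push, h1, hgs]
              rw [e3, if_neg (by omega)]
              congr 2
              omega
      · have e1 : push (top :: rest) a = a :: top :: rest := by simp [push, h1, ha, hg]
        rw [e1]
        simp [push, ha, hb]

theorem foldl_ok {u : List Char} {st : List Char} (h : StackOK st) :
    StackOK (u.foldl push st) := by
  induction u generalizing st with
  | nil => exact h
  | cons c u ih => exact ih (push_ok h c)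

theorem foldl_no_interact : ∀ (u st : List Char),
    List.IsChain (fun a b => sameg a b = false) u →
    (∀ t ∈ st.head?, ∀ h ∈ u.head?, sameg t h = false) →
    u.foldl push st = u.reverse ++ st := by
  intro u
  induction u with
  | nil => intro st _ _; simp
  | cons c u' ih =>
    intro st hch hcross
    have e1 : push st c = c :: st := push_no_interact (fun t ht => hcross t ht c rfl)
    simp only [List.foldl_cons, e1]
    rw [ih (c :: st) hch.tail ?_]
    · simp
    · intro t ht h hh
      simp only [List.head?_cons, Option.mem_some_iff] at ht
      subst ht
      rcases u' with _ | ⟨d, u''⟩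
      · simp at hh
      · simp only [List.head?_cons, Option.mem_some_iff] at hh
        subst hh
        exact (List.isChain_cons_cons.mp hch).1

-- one rewrite step (at any position) does not change the final stack
theorem step_eq {x y : List Char} {a b : Char} {g : Bool} {n1 n2 : Nat}
    (ha : gval a = some (g, n1)) (hb : gval b = some (g, n2)) :
    (x ++ a :: b :: y).foldl push [] =
    (x ++ (if (n1 + n2) % 3 = 0 then [] else [ltr g ((n1 + n2) % 3)]) ++ y).foldl push [] := by
  have hok : StackOK (x.foldl push []) := foldl_ok (by simp [StackOK])
  have key := push_push hok ha hb
  by_cases hs : (n1 + n2) % 3 = 0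
  · simp only [if_pos hs] at key ⊢
    simp only [List.foldl_append, List.foldl_cons, List.foldl_nil, key]
  · simp only [if_neg hs] at key ⊢
    simp only [List.foldl_append, List.foldl_cons, List.foldl_nil, key]

theorem combChar_some {a b c : Char} (h : combChar a b = some c) :
    ∃ g n, gval a = some (g, n) ∧ gval b = some (g, n) ∧ c = ltr g ((n + n) % 3) := by
  unfold combChar at h
  split_ifs at h with h1 h2 h3 h4
  · obtain ⟨rfl, rfl⟩ := h1; injection h with h; subst h
    exact ⟨true, 1, by decide, by decide, by decide⟩
  · obtain ⟨rfl, rfl⟩ := h2; injection h with h; subst h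
    exact ⟨false, 1, by decide, by decide, by decide⟩
  · obtain ⟨rfl, rfl⟩ := h3; injection h with h; subst h
    exact ⟨false, 2, by decide, by decide, by decide⟩
  · obtain ⟨rfl, rfl⟩ := h4; injection h with h; subst h
    exact ⟨true, 2, by decide, by decide, by decide⟩

theorem cancPair_true {a b : Char} (h : cancPair a b = true) :
    ∃ g n1 n2, gval a = some (g, n1) ∧ gval b = some (g, n2) ∧ (n1 + n2) % 3 = 0 := by
  unfold cancPair at h
  simp only [Bool.decide_or, Bool.or_eq_true, decide_eq_true_eq] at h
  rcases h with ⟨rfl, rfl⟩ | ⟨rfl, rfl⟩ | ⟨rfl, rfl⟩ | ⟨rfl, rfl⟩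
  · exact ⟨true, 1, 2, by decide, by decide, by decide⟩
  · exact ⟨true, 2, 1, by decide, by decide, by decide⟩
  · exact ⟨false, 1, 2, by decide, by decide, by decide⟩
  · exact ⟨false, 2, 1, by decide, by decide, by decide⟩

theorem scanA_some : ∀ {w w' : List Char}, scanA w = some w' →
    ∃ x a b c y, w = x ++ a :: b :: y ∧ w' = x ++ c :: y ∧ combChar a b = some c := by
  intro w
  induction w with
  | nil => simp [scanA]
  | cons a t ih =>
    cases t with
    | nil => simp [scanA]
    | cons b r =>
      intro w' h
      unfold scanA at h
      cases hc : combChar a b with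
      | some c =>
        rw [hc] at h; injection h with h; subst h
        exact ⟨[], a, b, c, r, rfl, rfl, hc⟩
      | none =>
        rw [hc] at h; simp only [Option.map_eq_some_iff] at h
        obtain ⟨u, hu, rfl⟩ := h
        obtain ⟨x, a', b', c, y, hw, hw', hcc⟩ := ih hu
        exact ⟨a :: x, a', b', c, y, by simp [hw], by simp [hw'], hcc⟩

theorem scanC_some : ∀ {w w' : List Char}, scanC w = some w' →
    ∃ x a b y, w = x ++ a :: b :: y ∧ w' = x ++ y ∧ cancPair a b = true := by
  intro w
  induction w with
  | nil => simp [scanC]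
  | cons a t ih =>
    cases t with
    | nil => simp [scanC]
    | cons b r =>
      intro w' h
      unfold scanC at h
      split_ifs at h with hc
      · injection h with h; subst h
        exact ⟨[], a, b, _, rfl, rfl, by simpa using hc⟩
      · simp only [Option.map_eq_some_iff] at h
        obtain ⟨u, hu, rfl⟩ := h
        obtain ⟨x, a', b', y, hw, hw', hcc⟩ := ih hu
        exact ⟨a :: x, a', b', y, by simp [hw], by simp [hw'], hcc⟩

theorem sameg_false_of_no_rule {a b : Char}
    (h1 : combChar a b = none) (h2 : cancPair a b = false) : sameg a b = false := by
  cases hs : sameg a b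
  · rfl
  · exfalso
    unfold sameg at hs
    rcases hga : gval a with _ | ⟨ga, na⟩ <;> rcases hgb : gval b with _ | ⟨gb, nb⟩ <;>
        rw [hga, hgb] at hs <;> simp only [] at hs
    · cases hs
    · cases hs
    · cases hs
    · rcases gval_cases hga with ⟨rfl, h⟩ | ⟨rfl, h⟩ | ⟨rfl, h⟩ | ⟨rfl, h⟩ <;>
        rcases gval_cases hgb with ⟨rfl, h'⟩ | ⟨rfl, h'⟩ | ⟨rfl, h'⟩ | ⟨rfl, h'⟩ <;>
        simp_all [combChar, cancPair]

theorem nointeract_of_scans_none : ∀ {w : List Char}, scanA w = none → scanC w = none →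
    List.IsChain (fun a b => sameg a b = false) w := by
  intro w
  induction w with
  | nil => intro _ _; simp
  | cons a t ih =>
    cases t with
    | nil => intro _ _; simp
    | cons b r =>
      intro hA hC
      unfold scanA at hA
      unfold scanC at hC
      have hcc : combChar a b = none := by
        cases hc : combChar a b with
        | some c => rw [hc] at hA; cases hA
        | none => rfl
      rw [hcc] at hA
      have hcp : cancPair a b = false := by
        cases hc : cancPair a b
        · rfl
        · rw [if_pos hc] at hC; cases hC
      rw [if_neg (by simp [hcp])] at hC
      simp only [Option.map_eq_none_iff] at hA hC
      refine List.isChain_cons_cons.mpr ⟨sameg_false_of_no_rule hcc hcp, ih hA hC⟩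

theorem norm_scanA_step {w w' : List Char} (h : scanA w = some w') :
    w'.foldl push [] = w.foldl push [] := by
  obtain ⟨x, a, b, c, y, rfl, rfl, hcc⟩ := scanA_some h
  obtain ⟨g, n, hga, hgb, rfl⟩ := combChar_some hcc
  have hn := gval_n_mem hga
  have hne : ¬ (n + n) % 3 = 0 := by omega
  have := step_eq (x := x) (y := y) hga hgb
  rw [if_neg hne] at this
  rw [this]
  congr 1
  simp

theorem norm_cleaner (w : List Char) :
    (cleaner_ext w).foldl push [] = w.foldl push [] := by
  have H : ∀ (n : Nat) (w : List Char), w.length ≤ n →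
      (cleaner_ext w).foldl push [] = w.foldl push [] := by
    intro n
    induction n with
    | zero =>
      intro w hw
      rcases w with _ | ⟨c, w⟩
      · rw [cleaner_ext.eq_def]; simp
      · simp at hw
    | succ n ih =>
      intro w hw
      rw [cleaner_ext.eq_def]
      split_ifs with h0 h1
      · rw [h0]
      · rfl
      · split
        · next w' hs =>
          have hlen := scanC_len hs
          rw [ih w' (by omega)]
          obtain ⟨x, a, b, y, hww, hw', hcp⟩ := scanC_some hs
          obtain ⟨g, m1, m2, hga, hgb, hz⟩ := cancPair_true hcp
          have := step_eq (x := x) (y := y) hga hgb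
          rw [if_pos hz] at this
          rw [hww, hw', this]
          congr 1
          simp
        · rfl
  exact H w.length w le_rfl

theorem scanC_none_of_cleaner_fix {w : List Char} (h0 : w ≠ []) (h1 : w.length ≠ 1)
    (hc : cleaner_ext w = w) : scanC w = none := by
  cases hs : scanC w with
  | none => rfl
  | some w' =>
    exfalso
    have hl := scanC_len hs
    have heq : cleaner_ext w = cleaner_ext w' := by
      rw [cleaner_ext.eq_def, if_neg h0, if_neg h1]
      split
      · next w'' hs' => rw [hs] at hs'; injection hs' with hs'; rw [hs']
      · next hs' => rw [hs] at hs'; cases hs'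
    have := cleaner_len w'
    have hlen := congrArg List.length hc
    rw [heq] at hlen
    omega

theorem main_eq : ∀ (n : Nat) (w v : List Char), w.length ≤ n →
    app_relList w v = if w = v then w else (w.foldl push []).reverse := by
  intro n
  induction n with
  | zero =>
    intro w v hw
    rcases w with _ | ⟨c, w⟩
    · rw [app_relList.eq_def]; split_ifs <;> simp_all
    · simp at hw
  | succ n ih =>
    intro w v hw
    rw [app_relList.eq_def]
    by_cases hv : w = v
    · simp [hv]
    · simp only [if_neg hv]
      by_cases h0 : w = []
      · subst h0; simp
      · rw [if_neg h0]
        by_cases h1 : w.length = 1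
        · rw [if_pos h1]
          rcases w with _ | ⟨c, w'⟩
          · simp at h0
          · rcases w' with _ | ⟨d, w''⟩
            · simp [push]
            · simp at h1
        · rw [if_neg h1]
          split
          · next w' hs =>
            have hlen := scanA_len hs
            rw [ih w' ['-', '1'] (by omega)]
            rw [← norm_scanA_step hs]
            split_ifs with hd
            · subst hd; decide
            · rfl
          · next hs =>
            by_cases hc : cleaner_ext w = w
            · rw [hc, app_relList.eq_def, if_pos rfl]
              have hcnone := scanC_none_of_cleaner_fix h0 h1 hc
              have hch := nointeract_of_scans_none hs hcnone
              rw [foldl_no_interact w [] hch (by simp)]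
              simp
            · have hshort : (cleaner_ext w).length + 2 ≤ w.length :=
                (cleaner_fix_or_short w).resolve_left hc
              rw [ih (cleaner_ext w) w (by omega), if_neg hc, norm_cleaner]

-- ===== VERDICT (by name: the statement is the Claim_ definition above) =====
theorem app_rel_spec : Claim_equal_app_rel := by
  intro w v _
  unfold Spec_app_rel app_rel app_rel_alt
  rw [main_eq w.toList.length w.toList v.toList le_rfl]
  by_cases h : w = v
  · simp [h]
  · have h' : w.toList ≠ v.toList := fun hh => h (String.toList_inj.mp hh)
    simp [h, h']
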